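-- pv_equiv track=rewrite | github.com/MixKage/ruins_secret_of_death | bot/db.py | _translate_sql
-- ===== SOURCE A (Python) =====
-- def _translate_sql(sql: str) -> str:
--     index = 0
--     out = []
--     in_single = False
--     in_double = False
--     i = 0
--     while i < len(sql):
--         ch = sql[i]
--         if ch == "'" and not in_double:
--             out.append(ch)
--             if in_single:
--                 if i + 1 < len(sql) and sql[i + 1] == "'":
--                     out.append("'")
--                     i += 1
--                 else:
--                     in_single = False
--             else:
--                 in_single = True
--         elif ch == '"' and not in_single:
--             out.append(ch)
--             in_double = not in_double
--         elif ch == "?" and not in_single and not in_double: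
--             index += 1
--             out.append(f"${index}")
--         else:
--             out.append(ch)
--         i += 1
--     return "".join(out)
-- ===== SOURCE B (Python) =====
-- def _translate_sql(sql: str) -> str:
--     out = []
--     n = 0
--     i = 0
--     L = len(sql)
--     while i < L:
--         ch = sql[i]
--         if ch == "?":
--             n += 1
--             out.append(f"${n}")
--             i += 1
--         elif ch == "'":
--             j = i + 1
--             while True:
--                 k = sql.find("'", j)
--                 if k == -1:
--                     j = L
--                     break
--                 if k + 1 < L and sql[k + 1] == "'":
--                     j = k + 2
--                 else:
--                     j = k + 1
--                     break
--             out.append(sql[i:j])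
--             i = j
--         elif ch == '"':
--             k = sql.find('"', i + 1)
--             j = L if k == -1 else k + 1
--             out.append(sql[i:j])
--             i = j
--         else:
--             j = i + 1
--             while j < L and sql[j] not in "'\"?":
--                 j += 1
--             out.append(sql[i:j])
--             i = j
--     return "".join(out)
-- ===== Notes on version B (the rewrite author's own statement) =====
-- stated objective: faster
-- what changed: A's per-character scan with in_single/in_double boolean state is replaced by a chunk tokenizer: at each step B consumes a whole token (a '?', an entire single-quoted region located via str.find with '' escape handling, an entire double-quoted region, or a maximal run of plain characters) and copies quoted regions and plain runs as single slices.
import Mathlib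
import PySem

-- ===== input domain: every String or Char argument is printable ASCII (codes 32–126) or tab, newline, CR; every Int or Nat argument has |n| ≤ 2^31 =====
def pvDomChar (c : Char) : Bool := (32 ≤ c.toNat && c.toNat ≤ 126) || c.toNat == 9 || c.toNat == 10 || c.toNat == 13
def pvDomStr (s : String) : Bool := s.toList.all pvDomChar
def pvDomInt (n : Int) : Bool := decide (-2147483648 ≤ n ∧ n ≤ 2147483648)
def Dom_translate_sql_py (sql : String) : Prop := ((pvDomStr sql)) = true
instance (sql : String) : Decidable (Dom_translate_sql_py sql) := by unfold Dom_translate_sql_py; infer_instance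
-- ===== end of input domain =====

-- B replaces A's per-character quote state machine by a chunk tokenizer that copies each
-- quoted region and each plain run as one slice (objective: faster by a constant factor; same return value).

-- ===== PORT A =====
-- A's while loop over positions with state (index, in_single, in_double, out); the
-- "i + 1 < len(sql) and sql[i+1] == '\''" lookahead becomes a head? test on the rest,
-- and "i += 1" inside it becomes taking the tail.

-- ===== PORT A =====
def aLoop : List Char → Int → Bool → Bool → List Char → List Char
  | [], _, _, _, out => out
  | c :: rest, index, in_single, in_double, out =>
    if c == '\'' && !in_double then
      let out := out ++ ['\'']
      if in_single then
        if rest.head? == some '\'' then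
          aLoop rest.tail index in_single in_double (out ++ ['\''])
        else
          aLoop rest index false in_double out
      else aLoop rest index true in_double out
    else if c == '"' && !in_single then
      aLoop rest index in_single (!in_double) (out ++ [c])
    else if c == '?' && !in_single && !in_double then
      aLoop rest (index + 1) in_single in_double (out ++ ('$' :: (PySem.Int.toStr (index + 1)).toList))
    else
      aLoop rest index in_single in_double (out ++ [c])
  termination_by l _ _ _ _ => l.length
  decreasing_by all_goals (cases rest <;> simp <;> omega)

def translate_sql_py (sql : String) : String :=
  String.ofList (aLoop sql.toList 0 false false [])

-- ===== PORT B =====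
def scanSingle : List Char → List Char × List Char
  | [] => ([], [])
  | c :: rest =>
    if c == '\'' then
      if rest.head? == some '\'' then
        let p := scanSingle rest.tail
        ('\'' :: '\'' :: p.1, p.2)
      else (['\''], rest)
    else
      let p := scanSingle rest
      (c :: p.1, p.2)
  termination_by l => l.length
  decreasing_by all_goals (cases rest <;> simp <;> omega)

def scanDouble : List Char → List Char × List Char
  | [] => ([], [])
  | c :: rest =>
    if c == '"' then (['"'], rest)
    else
      let p := scanDouble rest
      (c :: p.1, p.2)

def plainChar (c : Char) : Bool := !(c == '\'' || c == '"' || c == '?')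

theorem scanSingle_rest_le (l : List Char) : (scanSingle l).2.length ≤ l.length := by
  induction l using scanSingle.induct with
  | case1 => simp [scanSingle]
  | case2 c rest h1 h2 ih =>
      rw [scanSingle]
      simp only [h1, h2, if_pos]
      cases rest <;> simp_all <;> omega
  | case3 c rest h1 h2 =>
      rw [scanSingle]; simp [h1, h2]
  | case4 c rest h1 ih =>
      rw [scanSingle]; simp [h1]; omega

theorem scanDouble_rest_le (l : List Char) : (scanDouble l).2.length ≤ l.length := by
  induction l using scanDouble.induct with
  | case1 => simp [scanDouble]
  | case2 c rest h => rw [scanDouble]; simp [h]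
  | case3 c rest h ih => rw [scanDouble]; simp [h]; omega

def bLoop : List Char → Int → List Char → List Char
  | [], _, out => out
  | c :: rest, n, out =>
    if c == '?' then
      bLoop rest (n + 1) (out ++ ('$' :: (PySem.Int.toStr (n + 1)).toList))
    else if c == '\'' then
      let p := scanSingle rest
      bLoop p.2 n (out ++ '\'' :: p.1)
    else if c == '"' then
      let p := scanDouble rest
      bLoop p.2 n (out ++ '"' :: p.1)
    else
      let run := rest.takeWhile plainChar
      bLoop (rest.drop run.length) n (out ++ c :: run)
  termination_by l _ _ => l.length
  decreasing_by
  all_goals have hs := scanSingle_rest_le rest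
  all_goals have hd := scanDouble_rest_le rest
  all_goals simp
  all_goals omega

def translate_sql_py_alt (sql : String) : String :=
  String.ofList (bLoop sql.toList 0 [])


-- ===== PRECONDITION & SPEC =====
-- (A is total: no Pre_.)
def Spec_translate_sql_py (sql : String) (out : String) : Prop := out = translate_sql_py_alt sql
instance (sql : String) (out : String) : Decidable (Spec_translate_sql_py sql out) := by unfold Spec_translate_sql_py; infer_instance

-- ===== CLAIM (what is proved, stated in full; the proofs are below) =====
def Claim_equal_translate_sql_py : Prop := ∀ (sql : String), Dom_translate_sql_py sql → Spec_translate_sql_py sql (translate_sql_py sql)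

-- ===== LEMMAS AND PROOFS =====

-- Inside a single-quoted region A copies characters one by one; that equals B's scanSingle chunk,
-- with A back in the neutral state afterwards.
theorem aLoop_single (l : List Char) (idx : Int) (out : List Char) :
    aLoop l idx true false out =
      aLoop (scanSingle l).2 idx false false (out ++ (scanSingle l).1) := by
  induction l using scanSingle.induct generalizing out with
  | case1 => simp [aLoop, scanSingle]
  | case2 c rest h1 h2 ih =>
      rw [aLoop, scanSingle]
      simp only [h1, h2, if_pos, Bool.not_false, Bool.and_true, if_true]
      rw [ih]
      simp
  | case3 c rest h1 h2 =>
      rw [aLoop, scanSingle]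
      simp [h1, h2]
  | case4 c rest h1 ih =>
      rw [aLoop, scanSingle]
      simp only [h1]
      rw [if_neg (by simp [h1]), if_neg (by simp), if_neg (by simp)]
      rw [ih]
      simp

-- Likewise for a double-quoted region and scanDouble.
theorem aLoop_double (l : List Char) (idx : Int) (out : List Char) :
    aLoop l idx false true out =
      aLoop (scanDouble l).2 idx false false (out ++ (scanDouble l).1) := by
  induction l using scanDouble.induct generalizing out with
  | case1 => simp [aLoop, scanDouble]
  | case2 c rest h =>
      have hc := eq_of_beq h; subst hc
      rw [aLoop, scanDouble]
      simp
  | case3 c rest h ih =>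
      rw [aLoop, scanDouble]
      rw [if_neg (by simp), if_neg (by simp [h]), if_neg (by simp)]
      rw [if_neg (by simp [h]), ih]
      simp

-- B consumes a plain character exactly as if it copied it alone and continued.
theorem bLoop_plain (c : Char) (rest : List Char) (n : Int) (out : List Char)
    (hc : plainChar c = true) :
    bLoop (c :: rest) n out = bLoop rest n (out ++ [c]) := by
  simp only [plainChar, Bool.not_eq_eq_eq_not, Bool.not_true, Bool.or_eq_false_iff] at hc
  obtain ⟨⟨h1, h2⟩, h3⟩ := hc
  rw [bLoop]
  rw [if_neg (by simp_all), if_neg (by simp_all), if_neg (by simp_all)]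
  cases rest with
  | nil => simp [bLoop]
  | cons d r2 =>
      by_cases hd : plainChar d = true
      · conv_rhs => rw [bLoop]
        simp only [plainChar, Bool.not_eq_eq_eq_not, Bool.not_true, Bool.or_eq_false_iff] at hd
        obtain ⟨⟨g1, g2⟩, g3⟩ := hd
        rw [if_neg (by simp_all), if_neg (by simp_all), if_neg (by simp_all)]
        have hdp : plainChar d = true := by simp [plainChar, g1, g2, g3]
        simp [List.takeWhile_cons, hdp]
      · have hdp : plainChar d = false := by simpa using hd
        simp only [List.takeWhile_cons, hdp, Bool.false_eq_true, if_false,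
          List.length_nil, List.drop_zero]

-- Main induction (strong, on length, since B jumps over whole chunks): A in the neutral
-- state computes the same output as B.
theorem aLoop_eq_bLoop_n (n : ℕ) :
    ∀ (l : List Char), l.length ≤ n → ∀ (idx : Int) (out : List Char),
      aLoop l idx false false out = bLoop l idx out := by
  induction n with
  | zero =>
      intro l hl idx out
      have : l = [] := by cases l <;> simp_all
      subst this; simp [aLoop, bLoop]
  | succ n ih =>
      intro l hl idx out
      cases l with
      | nil => simp [aLoop, bLoop]
      | cons c rest =>
        simp only [List.length_cons, Nat.succ_le_succ_iff] at hl
        by_cases h1 : c = '\''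
        · subst h1
          rw [aLoop]
          rw [if_pos (by simp), if_neg (by simp)]
          rw [aLoop_single, ih _ (le_trans (scanSingle_rest_le rest) hl)]
          rw [bLoop]
          rw [if_neg (by simp), if_pos (by simp)]
          simp
        · by_cases h2 : c = '"'
          · subst h2
            rw [aLoop]
            rw [if_neg (by simp), if_pos (by simp)]
            simp only [Bool.not_false]
            rw [aLoop_double, ih _ (le_trans (scanDouble_rest_le rest) hl)]
            rw [bLoop]
            rw [if_neg (by simp), if_neg (by simp), if_pos (by simp)]
            simp
          · by_cases h3 : c = '?'
            · subst h3
              rw [aLoop]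
              rw [if_neg (by simp), if_neg (by simp), if_pos (by simp)]
              rw [ih _ hl]
              rw [bLoop, if_pos (by simp)]
            · have hp : plainChar c = true := by simp [plainChar, h1, h2, h3]
              rw [aLoop]
              rw [if_neg (by simp [h1]), if_neg (by simp [h2]), if_neg (by simp [h3])]
              rw [ih _ hl]
              rw [bLoop_plain c rest idx out hp]

-- ===== VERDICT (by name: the statement is the Claim_ definition above) =====
theorem translate_sql_py_spec : Claim_equal_translate_sql_py := by
  intro sql _
  unfold Spec_translate_sql_py translate_sql_py translate_sql_py_alt
  rw [aLoop_eq_bLoop_n sql.toList.length sql.toList le_rfl]
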